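-- pv_equiv track=rewrite | github.com/menickname/waafle | waafle_v1.0/waafle_aggregator.py | get_taxaset
-- ===== SOURCE A (Python) =====
-- def get_taxaset( taxa, status ):
--     """
--     Take taxa and create a set based on its status.
--     Return both the set and whether the taxa has multiple pairs/taxa with LGT/NoLGT, respectively.
--     """
--     taxaset = set([])
--     elimset = set([])
--     multipletaxa = False
--     if len( taxa.split(';') ) > 1:
--         multipletaxa = True
--         if status == 'ambiguous-LGT' or status == 'LGT':
--             i = 0
--             for splittaxa in taxa.split(';'):
--                 taxaone = splittaxa.split('-')[0]
--                 taxatwo = splittaxa.split('-')[1]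
--                 taxaset |= set([ taxaone, taxatwo ] )
--                 if i == 0:
--                     elimset = set([ taxaone, taxatwo ])
--                     i += 1
--                 else:
--                     elimset &= set([ taxaone, taxatwo ])
--         else:
--             for splittaxa in taxa.split(';'):
--                 taxaset.add( splittaxa )
--     else:
--         if status == 'ambiguous-LGT' or status == 'LGT':
--             taxaset.add( taxa.split('-')[0] )
--             taxaset.add( taxa.split('-')[1] )
--         else:
--             taxaset.add( taxa )
--     return multipletaxa, taxaset, elimset
-- ===== SOURCE B (Python) =====
-- def get_taxaset(taxa, status):
--     """Counting re-implementation: in the multi-token LGT branch, instead of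
--     accumulating a running union and a running intersection of pair-sets, count
--     in one ordered dict how many pairs each taxon occurs in; the taxaset is the
--     dict's keys and the elimset is the keys whose count equals the number of
--     pairs (i.e. the taxa present in every pair)."""
--     tokens = taxa.split(';')
--     lgt = status == 'ambiguous-LGT' or status == 'LGT'
--     if len(tokens) > 1:
--         if lgt:
--             counts = {}
--             for tok in tokens:
--                 parts = tok.split('-')
--                 for x in dict.fromkeys([parts[0], parts[1]]):
--                     counts[x] = counts.get(x, 0) + 1
--             n = len(tokens)
--             return True, set(counts), {x for x, c in counts.items() if c == n}
--         return True, set(tokens), set()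
--     if lgt:
--         return False, {taxa.split('-')[0], taxa.split('-')[1]}, set()
--     return False, {taxa}, set()
-- ===== Notes on version B (the rewrite author's own statement) =====
-- stated objective: alternative
-- what changed: The multi-token LGT branch no longer maintains a running set union and a running set intersection: it builds one ordered occurrence-count dict over all pairs in a single pass and derives the taxaset as the dict's keys and the elimset as the keys counted in every pair.
import Mathlib
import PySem

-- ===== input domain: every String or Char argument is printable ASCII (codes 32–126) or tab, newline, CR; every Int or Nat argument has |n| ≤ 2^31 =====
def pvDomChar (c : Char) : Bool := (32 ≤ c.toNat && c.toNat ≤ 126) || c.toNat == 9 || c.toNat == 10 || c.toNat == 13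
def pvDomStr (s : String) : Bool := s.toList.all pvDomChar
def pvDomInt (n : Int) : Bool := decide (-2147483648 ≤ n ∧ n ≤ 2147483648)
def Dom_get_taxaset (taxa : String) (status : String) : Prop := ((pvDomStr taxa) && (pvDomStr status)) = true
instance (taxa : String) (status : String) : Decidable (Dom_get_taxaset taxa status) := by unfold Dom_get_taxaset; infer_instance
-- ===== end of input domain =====

-- B replaces A's running union/intersection accumulators of the multi-token LGT branch by one
-- ordered occurrence-count dict: taxaset = its keys, elimset = keys counted in every pair.

-- ===== PORT A =====
-- s.split(sep) for the nonempty literal separators ';' and '-' (split? is some there)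
def pvSplit (s sep : String) : List String := (PySem.Str.split? s sep).getD []
-- splittaxa.split('-')[0/1]; .getD "" is never reached inside Pre_ (Python raises IndexError there)
def pvTaxaOneA (s : String) : String :=
  (PySem.List.pyGet? (pvSplit s "-") 0).getD ""
def pvTaxaTwoA (s : String) : String :=
  (PySem.List.pyGet? (pvSplit s "-") 1).getD ""

-- the 'for splittaxa in taxa.split(';')' loop of the LGT branch, state (taxaset, elimset, i)
def pvLoopA : List String → PySem.Set String → PySem.Set String → Nat →
    PySem.Set String × PySem.Set String
  | [], ts, es, _ => (ts, es)
  | s :: rest, ts, es, i =>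
      let t1 := pvTaxaOneA s
      let t2 := pvTaxaTwoA s
      let ts' := PySem.Set.union ts (PySem.Set.ofList [t1, t2])
      if i == 0 then
        pvLoopA rest ts' (PySem.Set.ofList [t1, t2]) (i + 1)
      else
        pvLoopA rest ts' (PySem.Set.inter es (PySem.Set.ofList [t1, t2])) i

def get_taxaset (taxa : String) (status : String) : Bool × List String × List String :=
  let taxaset : PySem.Set String := PySem.Set.empty
  let elimset : PySem.Set String := PySem.Set.empty
  if (pvSplit taxa ";").length > 1 then
    if status == "ambiguous-LGT" || status == "LGT" then
      let (ts, es) := pvLoopA (pvSplit taxa ";") taxaset elimset 0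
      (true, ts, es)
    else
      (true, (pvSplit taxa ";").foldl PySem.Set.add taxaset, elimset)
  else
    if status == "ambiguous-LGT" || status == "LGT" then
      (false, PySem.Set.add (PySem.Set.add taxaset (pvTaxaOneA taxa)) (pvTaxaTwoA taxa), elimset)
    else
      (false, PySem.Set.add taxaset taxa, elimset)

-- ===== PORT B =====
-- dict.fromkeys([parts[0], parts[1]]) — the (deduplicated, ordered) pair of a token
def pvPairB (s : String) : List String :=
  let parts := pvSplit s "-"
  PySem.List.dedup [(PySem.List.pyGet? parts 0).getD "", (PySem.List.pyGet? parts 1).getD ""]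

-- the counting loop: for tok in tokens: for x in fromkeys(pair): counts[x] = counts.get(x,0)+1
def pvCounts (tokens : List String) : PySem.Dict String Int :=
  tokens.foldl
    (fun d tok => (pvPairB tok).foldl (fun d x => d.modify x 0 (· + 1)) d)
    PySem.Dict.empty

def get_taxaset_alt (taxa : String) (status : String) : Bool × List String × List String :=
  let tokens := pvSplit taxa ";"
  let lgt := status == "ambiguous-LGT" || status == "LGT"
  if tokens.length > 1 then
    if lgt then
      let counts := pvCounts tokens
      let n : Int := tokens.length
      (true, counts.keys,
        PySem.Set.ofList ((counts.items.filter (fun p => p.2 == n)).map Prod.fst))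
    else
      (true, PySem.Set.ofList tokens, PySem.Set.empty)
  else
    if lgt then
      (false,
        PySem.Set.ofList [(PySem.List.pyGet? (pvSplit taxa "-") 0).getD "",
                          (PySem.List.pyGet? (pvSplit taxa "-") 1).getD ""],
        PySem.Set.empty)
    else
      (false, PySem.Set.ofList [taxa], PySem.Set.empty)

-- ===== PRECONDITION & SPEC =====
-- Pre_ excludes exactly the inputs where Python A raises IndexError: an LGT/ambiguous-LGT
-- status with some ';'-token lacking a '-' separator (B raises the same IndexError there).
def Pre_get_taxaset (taxa : String) (status : String) : Prop :=
  (status = "ambiguous-LGT" ∨ status = "LGT") →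
    ∀ s ∈ pvSplit taxa ";", 2 ≤ (pvSplit s "-").length
instance (taxa : String) (status : String) : Decidable (Pre_get_taxaset taxa status) := by
  unfold Pre_get_taxaset; infer_instance

def pvWitness_get_taxaset : String × String := ("Bact-Firm;Bact-Prot", "LGT")

def Spec_get_taxaset (taxa : String) (status : String) (out : Bool × List String × List String) : Prop := out = get_taxaset_alt taxa status
instance (taxa : String) (status : String) (out : Bool × List String × List String) : Decidable (Spec_get_taxaset taxa status out) := by unfold Spec_get_taxaset; infer_instance

-- ===== CLAIM (what is proved, stated in full; the proofs are below) =====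
def Claim_equal_get_taxaset : Prop := ∀ (taxa : String) (status : String), Dom_get_taxaset taxa status → Pre_get_taxaset taxa status → Spec_get_taxaset taxa status (get_taxaset taxa status)

-- ===== LEMMAS AND PROOFS =====

-- after the first token A's loop keeps i = 1: it is a pair of independent folds
theorem pvLoopA_one (l : List String) : ∀ (ts es : PySem.Set String),
    pvLoopA l ts es 1 =
      (l.foldl (fun acc s => PySem.Set.union acc (pvPairB s)) ts,
       l.foldl (fun acc s => PySem.Set.inter acc (pvPairB s)) es) := by
  induction l with
  | nil => intro ts es; simp [pvLoopA]
  | cons s rest ih =>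
      intro ts es
      simp only [pvLoopA, List.foldl]
      norm_num [ih]
      constructor <;> simp [pvPairB, pvTaxaOneA, pvTaxaTwoA]

theorem pvLoopA_start (s : String) (rest : List String) :
    pvLoopA (s :: rest) PySem.Set.empty PySem.Set.empty 0 =
      ((s :: rest).foldl (fun acc t => PySem.Set.union acc (pvPairB t)) PySem.Set.empty,
       rest.foldl (fun acc t => PySem.Set.inter acc (pvPairB t)) (pvPairB s)) := by
  have h1 : PySem.Set.ofList [pvTaxaOneA s, pvTaxaTwoA s] = pvPairB s := by
    simp [pvPairB, pvTaxaOneA, pvTaxaTwoA]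
  rw [show pvLoopA (s :: rest) PySem.Set.empty PySem.Set.empty 0 =
        pvLoopA rest
          (PySem.Set.union PySem.Set.empty (PySem.Set.ofList [pvTaxaOneA s, pvTaxaTwoA s]))
          (PySem.Set.ofList [pvTaxaOneA s, pvTaxaTwoA s]) 1 from rfl,
      pvLoopA_one, h1]
  simp [List.foldl]

-- the union fold is one update by the flattened pair list
theorem pvUnion_fold (l : List String) : ∀ (acc : PySem.Set String),
    l.foldl (fun acc s => PySem.Set.union acc (pvPairB s)) acc =
      PySem.Set.update acc (l.flatMap pvPairB) := by
  induction l with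
  | nil => intro acc; simp [PySem.Set.update_nil]
  | cons s rest ih =>
      intro acc
      simp only [List.foldl, List.flatMap_cons, ih, PySem.Set.update_append]
      rfl

-- the intersection fold is one filter by membership in every pair
theorem pvInter_fold (l : List String) : ∀ (a : PySem.Set String),
    l.foldl (fun acc s => PySem.Set.inter acc (pvPairB s)) a =
      a.filter (fun x => l.all (fun s => PySem.Set.contains (pvPairB s) x)) := by
  induction l with
  | nil => intro a; simp
  | cons s rest ih =>
      intro a
      simp only [List.foldl, ih]
      rw [show PySem.Set.inter a (pvPairB s) =
            a.filter (fun x => PySem.Set.contains (pvPairB s) x) from rfl,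
          List.filter_filter]
      apply List.filter_congr
      intro x _
      simp [Bool.and_comm]

-- counting over the flattened pairs = number of pairs containing x (pairs are Nodup)
theorem pvCount_flat (tokens : List String) (x : String) :
    (tokens.flatMap pvPairB).count x =
      tokens.countP (fun s => decide (x ∈ pvPairB s)) := by
  induction tokens with
  | nil => simp
  | cons s rest ih =>
      simp only [List.flatMap_cons, List.count_append, ih, List.countP_cons]
      by_cases hx : x ∈ pvPairB s
      · rw [List.count_eq_one_of_mem (by simp [pvPairB]) hx]
        simp [hx, Nat.add_comm]
      · rw [List.count_eq_zero.mpr hx]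
        simp [hx]

-- B's counts dict is the Counter of the flattened pair list
theorem pvCounts_eq (tokens : List String) :
    pvCounts tokens = PySem.Dict.counter (tokens.flatMap pvPairB) := by
  rw [pvCounts, PySem.Dict.counter_eq_foldl, List.foldl_flatMap]

-- B's elimset as a filter of the deduplicated flattened list
theorem pvElimB (tokens : List String) :
    PySem.Set.ofList
        (((pvCounts tokens).items.filter (fun p => p.2 == (tokens.length : Int))).map
          Prod.fst) =
      (PySem.Set.ofList (tokens.flatMap pvPairB)).filter
        (fun x => ((tokens.flatMap pvPairB).count x : Int) == (tokens.length : Int)) := by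
  rw [pvCounts_eq, PySem.Dict.items_counter, List.filter_map, List.map_map]
  have h2 : ((PySem.Set.ofList (tokens.flatMap pvPairB)).filter
      (fun x => ((tokens.flatMap pvPairB).count x : Int) == (tokens.length : Int))).Nodup :=
    List.Nodup.filter _ (PySem.Set.nodup_ofList _)
  rw [show (Prod.fst ∘ fun k => (k, ((tokens.flatMap pvPairB).count k : Int))) = id from rfl,
      List.map_id]
  exact PySem.Set.ofList_eq_self_of_nodup _ h2

-- the elimsets agree: "counted in every pair" = "in the first pair and every later pair"
theorem pvElim_agree (t0 : String) (rest : List String) :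
    (PySem.Set.ofList ((t0 :: rest).flatMap pvPairB)).filter
        (fun x => (((t0 :: rest).flatMap pvPairB).count x : Int) ==
          (((t0 :: rest).length : Nat) : Int)) =
      (pvPairB t0).filter (fun x => rest.all (fun s => PySem.Set.contains (pvPairB s) x)) := by
  have hpair : (pvPairB t0).Nodup := by simp [pvPairB]
  have hof : PySem.Set.ofList ((t0 :: rest).flatMap pvPairB) =
      pvPairB t0 ++ (PySem.Set.ofList (rest.flatMap pvPairB)).filter
        (fun y => !(PySem.Set.contains (pvPairB t0) y)) := by
    rw [List.flatMap_cons, PySem.Set.ofList_append,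
      PySem.Set.ofList_eq_self_of_nodup (pvPairB t0) hpair,
      PySem.Set.update_eq_append_filter]
  rw [hof, List.filter_append]
  have hcnt : ∀ x, ((t0 :: rest).flatMap pvPairB).count x =
      (if x ∈ pvPairB t0 then 1 else 0) + rest.countP (fun s => decide (x ∈ pvPairB s)) := by
    intro x
    rw [pvCount_flat, List.countP_cons]
    simp only [decide_eq_true_eq]
    split_ifs with h <;> omega
  have hnew : ((PySem.Set.ofList (rest.flatMap pvPairB)).filter
      (fun y => !(PySem.Set.contains (pvPairB t0) y))).filter
      (fun x => (((t0 :: rest).flatMap pvPairB).count x : Int) ==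
        (((t0 :: rest).length : Nat) : Int)) = [] := by
    rw [List.filter_eq_nil_iff]
    intro x hx
    have hx0 : x ∉ pvPairB t0 := by
      have := (List.mem_filter.mp hx).2
      simpa [PySem.Set.contains_iff] using this
    have hle : rest.countP (fun s => decide (x ∈ pvPairB s)) ≤ rest.length :=
      List.countP_le_length
    have hc := hcnt x
    simp only [hx0, if_false, Nat.zero_add] at hc
    simp only [beq_iff_eq, hc, List.length_cons, Nat.cast_inj]
    omega
  rw [hnew, List.append_nil]
  apply List.filter_congr
  intro x hx
  have hc := hcnt x
  simp only [hx, if_true] at hc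
  rw [Bool.eq_iff_iff, beq_iff_eq, hc]
  simp only [List.length_cons, List.all_eq_true, PySem.Set.contains_iff, Nat.cast_inj]
  constructor
  · intro h s hs
    have hcp : rest.countP (fun s => decide (x ∈ pvPairB s)) = rest.length := by omega
    exact decide_eq_true_eq.mp (List.countP_eq_length.mp hcp s hs)
  · intro h
    have : rest.countP (fun s => decide (x ∈ pvPairB s)) = rest.length :=
      List.countP_eq_length.mpr (fun s hs => by simp [h s hs])
    omega

-- ===== VERDICT (by name: the statement is the Claim_ definition above) =====
theorem get_taxaset_spec : Claim_equal_get_taxaset := by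
  intro taxa status _ _
  unfold Spec_get_taxaset get_taxaset get_taxaset_alt
  by_cases hst : (status == "ambiguous-LGT" || status == "LGT") = true
  · cases htok : pvSplit taxa ";" with
    | nil =>
        simp [hst, pvTaxaOneA, pvTaxaTwoA, PySem.Set.ofList_eq_foldl, List.foldl]
    | cons s rest =>
        cases rest with
        | nil =>
            simp [hst, pvTaxaOneA, pvTaxaTwoA, PySem.Set.ofList_eq_foldl, List.foldl]
        | cons t rs =>
            have hlen : (s :: t :: rs).length > 1 := by simp
            simp only [hst, if_pos hlen, pvLoopA_start, pvInter_fold, pvUnion_fold, if_true]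
            have hkeys : (pvCounts (s :: t :: rs)).keys =
                PySem.Set.ofList ((s :: t :: rs).flatMap pvPairB) := by
              rw [pvCounts_eq, PySem.Dict.keys_counter]
            simp only [Prod.mk.injEq]
            refine ⟨trivial, ?_, ?_⟩
            · rw [hkeys]; rfl
            · rw [pvElimB, ← pvElim_agree]
  · cases htok : pvSplit taxa ";" with
    | nil => simp [hst, PySem.Set.ofList_eq_foldl, List.foldl]
    | cons s rest =>
        cases rest with
        | nil => simp [hst, PySem.Set.ofList_eq_foldl, List.foldl]
        | cons t rs => simp [hst, PySem.Set.ofList_eq_foldl, List.foldl]
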